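-- pv_equiv track=rewrite | github.com/AI-888/06-Aether | chains/namesrv_jvm_chain.py | _pick_pid
-- ===== SOURCE A (Python) =====
-- from typing import Dict, Any, List, Optional
--
-- def _pick_pid(jps_output: str) -> Optional[str]:
--     for line in jps_output.splitlines():
--         if "NamesrvStartup" in line or "namesrv" in line.lower():
--             return line.strip().split()[0]
--     for line in jps_output.splitlines():
--         parts = line.strip().split()
--         if parts:
--             return parts[0]
--     return None
-- ===== SOURCE B (Python) =====
-- from typing import Optional
--
-- def _pick_pid(jps_output: str) -> Optional[str]:
--     fallback = None
--     for line in jps_output.splitlines():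
--         if "NamesrvStartup" in line or "namesrv" in line.lower():
--             return line.strip().split()[0]
--         if fallback is None:
--             parts = line.strip().split()
--             if parts:
--                 fallback = parts[0]
--     return fallback
-- ===== Notes on version B (the rewrite author's own statement) =====
-- stated objective: alternative
-- what changed: A's two separate scans (match scan, then first-nonempty scan) are fused into a single pass over splitlines that carries the fallback candidate as accumulator state; splitlines is computed once and each line is visited once.
import Mathlib
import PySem

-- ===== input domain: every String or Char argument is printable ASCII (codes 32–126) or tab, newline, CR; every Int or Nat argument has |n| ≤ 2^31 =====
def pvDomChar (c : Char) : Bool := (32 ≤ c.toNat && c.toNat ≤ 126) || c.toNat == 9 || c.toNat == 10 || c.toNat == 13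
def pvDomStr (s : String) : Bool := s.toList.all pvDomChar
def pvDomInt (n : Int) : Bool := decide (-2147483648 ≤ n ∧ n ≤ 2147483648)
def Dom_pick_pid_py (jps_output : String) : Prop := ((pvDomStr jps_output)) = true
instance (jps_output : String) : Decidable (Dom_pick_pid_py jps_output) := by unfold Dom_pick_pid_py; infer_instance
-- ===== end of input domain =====

-- B fuses A's two scans over splitlines into one pass carrying the fallback candidate as state (objective: alternative decomposition — one traversal with accumulator state instead of two scans).

-- shared line test: "NamesrvStartup" in line or "namesrv" in line.lower()
def pvNamesrvLine (line : String) : Bool :=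
  PySem.Str.isIn "NamesrvStartup" line || PySem.Str.isIn "namesrv" (PySem.Str.lower line)

-- ===== PORT A =====
-- first loop: return line.strip().split()[0] on the first matching line (pyGet? = Python's [0])
def pvPickLoop1 : List String → Option (Option String)
  | [] => none
  | l :: ls =>
    if pvNamesrvLine l then some (PySem.List.pyGet? (PySem.Str.split₀ (PySem.Str.strip l)) 0)
    else pvPickLoop1 ls

-- second loop: first token of the first line whose stripped split is non-empty
def pvPickLoop2 : List String → Option String
  | [] => none
  | l :: ls =>
    let parts := PySem.Str.split₀ (PySem.Str.strip l)
    if parts ≠ [] then PySem.List.pyGet? parts 0 else pvPickLoop2 ls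

def pick_pid_py (jps_output : String) : Option String :=
  match pvPickLoop1 (PySem.Str.splitlines jps_output) with
  | some r => r
  | none => pvPickLoop2 (PySem.Str.splitlines jps_output)

-- ===== PORT B =====
-- single pass; fb is the fallback accumulator, set at the first non-empty stripped line
def pvPickAlt : List String → Option String → Option String
  | [], fb => fb
  | l :: ls, fb =>
    if pvNamesrvLine l then PySem.List.pyGet? (PySem.Str.split₀ (PySem.Str.strip l)) 0
    else
      let fb' := if fb = none then (PySem.Str.split₀ (PySem.Str.strip l)).head? else fb
      pvPickAlt ls fb'

def pick_pid_py_alt (jps_output : String) : Option String :=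
  pvPickAlt (PySem.Str.splitlines jps_output) none

-- ===== PRECONDITION & SPEC =====
def Spec_pick_pid_py (jps_output : String) (out : Option String) : Prop := out = pick_pid_py_alt jps_output
instance (jps_output : String) (out : Option String) : Decidable (Spec_pick_pid_py jps_output out) := by unfold Spec_pick_pid_py; infer_instance

-- ===== CLAIM (what is proved, stated in full; the proofs are below) =====
def Claim_equal_pick_pid_py : Prop := ∀ (jps_output : String), Dom_pick_pid_py jps_output → Spec_pick_pid_py jps_output (pick_pid_py jps_output)

-- ===== LEMMAS AND PROOFS =====

-- unfolding equations stated by hand (plain `simp [pvPickAlt]` times out whnf-ing the string literals)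
theorem pvPickAlt_cons (l : String) (ls : List String) (fb : Option String) :
    pvPickAlt (l :: ls) fb =
      if pvNamesrvLine l then PySem.List.pyGet? (PySem.Str.split₀ (PySem.Str.strip l)) 0
      else pvPickAlt ls (if fb = none then (PySem.Str.split₀ (PySem.Str.strip l)).head? else fb) := rfl

theorem pvPickLoop1_cons (l : String) (ls : List String) :
    pvPickLoop1 (l :: ls) =
      if pvNamesrvLine l then some (PySem.List.pyGet? (PySem.Str.split₀ (PySem.Str.strip l)) 0)
      else pvPickLoop1 ls := rfl

theorem pvPickLoop2_cons (l : String) (ls : List String) :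
    pvPickLoop2 (l :: ls) =
      if PySem.Str.split₀ (PySem.Str.strip l) ≠ [] then PySem.List.pyGet? (PySem.Str.split₀ (PySem.Str.strip l)) 0
      else pvPickLoop2 ls := rfl

-- the fused loop equals: try loop1; else the fallback if already set; else loop2
theorem pvPickAlt_eq (ls : List String) :
    ∀ fb, pvPickAlt ls fb =
      match pvPickLoop1 ls with
      | some r => r
      | none => match fb with
                | some x => some x
                | none => pvPickLoop2 ls := by
  induction ls with
  | nil => intro fb; cases fb <;> rfl
  | cons l ls ih =>
    intro fb
    rw [pvPickAlt_cons, pvPickLoop1_cons]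
    by_cases h : pvNamesrvLine l = true
    · rw [if_pos h, if_pos h]
    · rw [if_neg h, if_neg h, ih]
      cases fb with
      | some x => simp
      | none =>
        rw [pvPickLoop2_cons]
        cases hp : PySem.Str.split₀ (PySem.Str.strip l) with
        | nil => simp
        | cons p ps => cases pvPickLoop1 ls <;> simp

-- ===== VERDICT (by name: the statement is the Claim_ definition above) =====
theorem pick_pid_py_spec : Claim_equal_pick_pid_py := by
  intro s _
  unfold Spec_pick_pid_py pick_pid_py pick_pid_py_alt
  rw [pvPickAlt_eq]
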